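-- pv_equiv track=rewrite | github.com/mgt2/ACEEI-Drafts | draft.py | isValidSchedule
-- ===== SOURCE A (Python) =====
-- def extract_courses (course_tuple) :
--     result_array = []
--     for item in course_tuple:
--         result_array.append(item)
--
--     return result_array
--
-- def isValidSchedule(budget, prices, course_tuple) :
--     courses = extract_courses(course_tuple)
--     sum = 0
--     for course in courses:
--         sum += prices[course]
--         if budget < sum :
--             return False
--     return True
-- ===== SOURCE B (Python) =====
-- def isValidSchedule(budget, prices, course_tuple):
--     # Backward scan computing the MAXIMUM prefix sum of the selected prices
--     # (Kadane-style recurrence: m = p + max(0, m)), then a single comparison.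
--     # All prefix sums are <= budget iff the maximum prefix sum is.
--     m = None
--     for c in reversed(course_tuple):
--         p = prices[c]
--         m = p if m is None else p + max(0, m)
--     return m is None or m <= budget
-- ===== Notes on version B (the rewrite author's own statement) =====
-- stated objective: alternative
-- what changed: B replaces A's forward loop with early exit on each partial sum by a backward scan computing the maximum prefix sum via the Kadane-style recurrence m = p + max(0, m), followed by a single comparison of that maximum against the budget (correct since all prefix sums are within budget iff the largest one is); A's redundant copy of course_tuple is dropped.
-- outside the precondition, e.g. on isValidSchedule(0, {2: 5}, (2, 3)): A returns False, B raises KeyError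
import Mathlib
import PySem

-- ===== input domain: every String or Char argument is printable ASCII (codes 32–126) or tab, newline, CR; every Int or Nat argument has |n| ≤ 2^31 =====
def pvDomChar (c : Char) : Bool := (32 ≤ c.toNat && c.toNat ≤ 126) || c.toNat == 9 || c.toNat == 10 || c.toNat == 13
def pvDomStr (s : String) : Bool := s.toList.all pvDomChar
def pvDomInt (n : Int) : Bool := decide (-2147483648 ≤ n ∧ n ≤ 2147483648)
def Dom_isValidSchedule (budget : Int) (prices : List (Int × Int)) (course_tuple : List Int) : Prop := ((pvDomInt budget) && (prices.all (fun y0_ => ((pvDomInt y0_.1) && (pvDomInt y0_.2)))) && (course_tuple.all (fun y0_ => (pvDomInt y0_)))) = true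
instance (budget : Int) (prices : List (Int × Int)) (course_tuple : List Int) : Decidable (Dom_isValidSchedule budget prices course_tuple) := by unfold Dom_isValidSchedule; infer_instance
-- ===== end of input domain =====

-- B scans the courses backwards maintaining the maximum prefix sum (Kadane-style m = p + max 0 m)
-- and makes one final budget comparison, instead of A's forward loop with an early exit per partial sum.


-- ===== PORT A =====
-- prices[course]: dict lookup = first matching key (Pre_ guarantees the key exists; 0 is never used inside Pre_)
def priceOf (prices : List (Int × Int)) (c : Int) : Int :=
  (((prices.find? (fun p => decide (p.1 = c))).map (·.2)).getD 0)

def extractCourses (course_tuple : List Int) : List Int :=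
  course_tuple.foldl (fun acc item => acc ++ [item]) []

def isValidScheduleGo (budget : Int) (prices : List (Int × Int)) : List Int → Int → Bool
  | [], _ => true
  | c :: rest, s =>
    let s' := s + priceOf prices c
    if budget < s' then false else isValidScheduleGo budget prices rest s'

def isValidSchedule (budget : Int) (prices : List (Int × Int)) (course_tuple : List Int) : Bool :=
  isValidScheduleGo budget prices (extractCourses course_tuple) 0

-- ===== PORT B =====
-- backward scan: m = maximum prefix sum of the remaining selection (none for the empty one)
def isValidSchedule_alt (budget : Int) (prices : List (Int × Int)) (course_tuple : List Int) : Bool :=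
  let m := course_tuple.reverse.foldl
    (fun (m : Option Int) c =>
      let p := priceOf prices c
      match m with
      | none => some p
      | some v => some (p + max 0 v)) none
  match m with
  | none => true
  | some v => decide (v ≤ budget)

-- ===== PRECONDITION & SPEC =====
-- Pre_ excludes course tuples containing a course with no entry in prices: there Python A raises
-- KeyError (or, if the budget is already exceeded earlier, returns False) while B always raises KeyError.
def Pre_isValidSchedule (budget : Int) (prices : List (Int × Int)) (course_tuple : List Int) : Prop :=
  ∀ c ∈ course_tuple, c ∈ prices.map (·.1)
instance (budget : Int) (prices : List (Int × Int)) (course_tuple : List Int) : Decidable (Pre_isValidSchedule budget prices course_tuple) := by unfold Pre_isValidSchedule; infer_instance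

def pvWitness_isValidSchedule : Int × (List (Int × Int)) × List Int := (10, [(1, 4), (2, 5)], [1, 2])

def Spec_isValidSchedule (budget : Int) (prices : List (Int × Int)) (course_tuple : List Int) (out : Bool) : Prop := out = isValidSchedule_alt budget prices course_tuple
instance (budget : Int) (prices : List (Int × Int)) (course_tuple : List Int) (out : Bool) : Decidable (Spec_isValidSchedule budget prices course_tuple out) := by unfold Spec_isValidSchedule; infer_instance

-- ===== CLAIM (what is proved, stated in full; the proofs are below) =====
def Claim_equal_isValidSchedule : Prop := ∀ (budget : Int) (prices : List (Int × Int)) (course_tuple : List Int), Dom_isValidSchedule budget prices course_tuple → Pre_isValidSchedule budget prices course_tuple → Spec_isValidSchedule budget prices course_tuple (isValidSchedule budget prices course_tuple)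

-- ===== LEMMAS AND PROOFS =====

theorem extractCourses_go (l acc : List Int) :
    l.foldl (fun acc item => acc ++ [item]) acc = acc ++ l := by
  induction l generalizing acc with
  | nil => simp
  | cons x xs ih => simp [List.foldl, ih]

theorem extractCourses_id (l : List Int) : extractCourses l = l := by
  rw [extractCourses, extractCourses_go]; simp

-- B's step, foldr-shaped (reverse-foldl = foldr of the flipped step)
def maxPrefix (prices : List (Int × Int)) (l : List Int) : Option Int :=
  l.foldr (fun c m =>
    let p := priceOf prices c
    match m with
    | none => some p
    | some v => some (p + max 0 v)) none

theorem go_eq_maxPrefix (budget : Int) (prices : List (Int × Int)) (l : List Int) (s : Int) :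
    isValidScheduleGo budget prices l s =
      (match maxPrefix prices l with
       | none => true
       | some v => decide (s + v ≤ budget)) := by
  induction l generalizing s with
  | nil => simp [isValidScheduleGo, maxPrefix]
  | cons c rest ih =>
    simp only [isValidScheduleGo, maxPrefix, List.foldr] at *
    rw [ih (s + priceOf prices c)]
    cases h : rest.foldr (fun c m =>
        let p := priceOf prices c
        match m with
        | none => some p
        | some v => some (p + max 0 v)) none with
    | none =>
      simp only []
      by_cases hb : budget < s + priceOf prices c
      · simp [hb, show ¬ (s + priceOf prices c ≤ budget) by omega]
      · simp [hb, show s + priceOf prices c ≤ budget by omega]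
    | some v =>
      simp only []
      by_cases hb : budget < s + priceOf prices c
      · have : ¬ (s + (priceOf prices c + max 0 v) ≤ budget) := by
          have := le_max_left 0 v; omega
        simp [hb, this]
      · by_cases hv : 0 ≤ v
        · simp [hb, max_eq_right hv, add_assoc]
        · have hm : max 0 v = 0 := max_eq_left (by omega)
          simp [hb, hm]
          omega

-- ===== VERDICT (by name: the statement is the Claim_ definition above) =====
theorem isValidSchedule_spec : Claim_equal_isValidSchedule := by
  intro budget prices course_tuple _ _
  unfold Spec_isValidSchedule
  rw [isValidSchedule, extractCourses_id, isValidSchedule_alt]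
  rw [List.foldl_reverse]
  rw [go_eq_maxPrefix budget prices course_tuple 0]
  unfold maxPrefix
  cases course_tuple.foldr (fun c m =>
      let p := priceOf prices c
      match m with
      | none => some p
      | some v => some (p + max 0 v)) none with
  | none => rfl
  | some v => simp
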